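-- pv_equiv track=rewrite | github.com/BlazingDB/blazingsql | tests/BlazingSQLTest/Utils/utilityHive.py | _are_repeats_partitions
-- ===== SOURCE A (Python) =====
-- def _are_repeats_partitions(items):
-- 	comp = set()
-- 	for i in items:
-- 		comp.add( i.split('=')[0] )
--
-- 	if len(comp) == len(items):
-- 		return False
-- 	else:
-- 		return True
-- ===== SOURCE B (Python) =====
-- def _are_repeats_partitions(items):
--     prefixes = sorted(i.split('=')[0] for i in items)
--     for prev, cur in zip(prefixes, prefixes[1:]):
--         if prev == cur:
--             return True
--     return False
-- ===== Notes on version B (the rewrite author's own statement) =====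
-- stated objective: alternative
-- what changed: Replaced the set-cardinality test (build a set of prefixes, compare its size to len(items)) by sorting the prefix list and scanning once for an equal adjacent pair.
import Mathlib
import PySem

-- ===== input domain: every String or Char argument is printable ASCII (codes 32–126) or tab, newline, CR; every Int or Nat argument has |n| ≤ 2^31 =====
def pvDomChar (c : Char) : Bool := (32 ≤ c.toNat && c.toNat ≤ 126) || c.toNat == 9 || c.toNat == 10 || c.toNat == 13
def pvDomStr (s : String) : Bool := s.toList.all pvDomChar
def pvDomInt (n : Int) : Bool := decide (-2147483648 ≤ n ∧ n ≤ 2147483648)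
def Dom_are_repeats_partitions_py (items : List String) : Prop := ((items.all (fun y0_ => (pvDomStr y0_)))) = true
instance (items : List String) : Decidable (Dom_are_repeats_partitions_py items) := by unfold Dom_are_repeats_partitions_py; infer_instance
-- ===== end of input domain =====

-- B replaces A's set-cardinality test by a sort of the prefix list followed by one
-- adjacent-equality scan (alternative decomposition, same result).

-- i.split('=')[0]: '=' is a non-empty separator so split? returns some non-empty list;
-- getD []/headD "" only make the expression total, the defaults are never used.
def pvPrefix (i : String) : String := ((PySem.Str.split? i "=").getD []).headD ""

-- ===== PORT A =====
def are_repeats_partitions_py (items : List String) : Bool :=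
  let comp : PySem.Set String :=
    items.foldl (fun s i => PySem.Set.add s (pvPrefix i)) PySem.Set.empty
  if PySem.Set.len comp = PySem.List.len items then false else true

-- ===== PORT B =====
-- the zip(prefixes, prefixes[1:]) loop with early return True on an equal pair
def pvAdjDup : List String → Bool
  | a :: b :: t => a == b || pvAdjDup (b :: t)
  | _ => false

def are_repeats_partitions_py_alt (items : List String) : Bool :=
  pvAdjDup (PySem.List.sorted (items.map pvPrefix) (fun x => x) false)

-- ===== PRECONDITION & SPEC =====
def Spec_are_repeats_partitions_py (items : List String) (out : Bool) : Prop := out = are_repeats_partitions_py_alt items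
instance (items : List String) (out : Bool) : Decidable (Spec_are_repeats_partitions_py items out) := by unfold Spec_are_repeats_partitions_py; infer_instance

-- ===== CLAIM (what is proved, stated in full; the proofs are below) =====
def Claim_equal_are_repeats_partitions_py : Prop := ∀ (items : List String), Dom_are_repeats_partitions_py items → Spec_are_repeats_partitions_py items (are_repeats_partitions_py items)

-- ===== LEMMAS AND PROOFS =====

theorem pv_ofList_sublist (xs : List String) : (PySem.Set.ofList xs).Sublist xs := by
  induction xs with
  | nil => simp [PySem.Set.ofList]
  | cons x t ih =>
      rw [PySem.Set.ofList_cons]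
      refine List.Sublist.cons₂ x ?_
      exact List.Sublist.trans (List.filter_sublist) ih

theorem pv_len_ofList_iff (xs : List String) :
    (PySem.Set.ofList xs).length = xs.length ↔ xs.Nodup := by
  constructor
  · intro h
    have := (pv_ofList_sublist xs).eq_of_length h
    rw [← this]; exact PySem.Set.nodup_ofList xs
  · intro h; rw [PySem.Set.ofList_eq_self_of_nodup xs h]

theorem pv_adjDup_iff (l : List String) (hp : l.Pairwise (· ≤ ·)) :
    pvAdjDup l = true ↔ ¬ l.Nodup := by
  induction l with
  | nil => simp [pvAdjDup]
  | cons a t ih =>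
      cases t with
      | nil => simp [pvAdjDup]
      | cons b u =>
          have hp' : (b :: u).Pairwise (· ≤ ·) := hp.tail
          have hab : a ≤ b := (List.pairwise_cons.1 hp).1 b (by simp)
          have hau : ∀ y ∈ u, a ≤ y := fun y hy =>
            (List.pairwise_cons.1 hp).1 y (by simp [hy])
          have hbu : ∀ y ∈ u, b ≤ y := fun y hy =>
            (List.pairwise_cons.1 hp').1 y hy
          rw [show pvAdjDup (a :: b :: u) = (a == b || pvAdjDup (b :: u)) from rfl,
              Bool.or_eq_true, beq_iff_eq, ih hp']
          constructor
          · rintro (rfl | h)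
            · simp
            · intro hn; exact h hn.tail
          · intro hn
            by_cases hab' : a = b
            · exact Or.inl hab'
            · right
              intro hn'
              apply hn
              refine List.nodup_cons.2 ⟨?_, hn'⟩
              simp only [List.mem_cons]
              rintro (rfl | hmem)
              · exact hab' rfl
              · exact hab' (le_antisymm hab (hbu a hmem))

theorem pv_A_eq (items : List String) :
    are_repeats_partitions_py items = !decide (items.map pvPrefix).Nodup := by
  unfold are_repeats_partitions_py
  have hfold : items.foldl (fun s i => PySem.Set.add s (pvPrefix i)) PySem.Set.empty
      = PySem.Set.ofList (items.map pvPrefix) := by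
    rw [PySem.Set.ofList_eq_foldl, List.foldl_map]; rfl
  simp only [hfold]
  have hlen : (PySem.Set.len (PySem.Set.ofList (items.map pvPrefix)) = PySem.List.len items)
      ↔ (items.map pvPrefix).Nodup := by
    rw [← pv_len_ofList_iff]
    simp [PySem.Set.len, PySem.List.len_eq]
  by_cases h : (items.map pvPrefix).Nodup
  · rw [if_pos (hlen.2 h)]; simp [h]
  · rw [if_neg (fun hc => h (hlen.1 hc))]; simp [h]

theorem pv_B_eq (items : List String) :
    are_repeats_partitions_py_alt items = !decide (items.map pvPrefix).Nodup := by
  unfold are_repeats_partitions_py_alt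
  set ps := items.map pvPrefix with hps
  have hperm : (PySem.List.sorted ps (fun x => x) false).Perm ps :=
    PySem.List.sorted_perm ps (fun x => x) false
  have hp : (PySem.List.sorted ps (fun x => x) false).Pairwise (· ≤ ·) :=
    PySem.List.sorted_pairwise ps (fun x => x)
  have := pv_adjDup_iff _ hp
  rw [hperm.nodup_iff] at this
  by_cases h : ps.Nodup
  · simp only [h, decide_true, Bool.not_true]
    cases hb : pvAdjDup (PySem.List.sorted ps (fun x => x) false)
    · rfl
    · exact absurd h (this.1 hb)
  · simp only [h, decide_false, Bool.not_false]
    exact this.2 h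

-- ===== VERDICT (by name: the statement is the Claim_ definition above) =====
theorem are_repeats_partitions_py_spec : Claim_equal_are_repeats_partitions_py := by
  intro items _
  unfold Spec_are_repeats_partitions_py
  rw [pv_A_eq, pv_B_eq]
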